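-- pv_equiv track=rewrite | github.com/santiberon98/sinergias | AlgoritmosGH.py | ordenarTemporalmente
-- ===== SOURCE A (Python) =====
-- def ordenarTemporalmente(eventos_lado_recortado, eventos_contexto_recortado, eventos_tiempo_recortado):
--     eventos_tiempo_recortado_2 = eventos_tiempo_recortado
--     eventos_lado_ordenado=sorted(zip(eventos_tiempo_recortado, eventos_lado_recortado))
--     eventos_contexto_ordenado=sorted(zip(eventos_tiempo_recortado_2, eventos_contexto_recortado))
--
--     tiempos = []
--     lados = []
--     contextos = []
--
--     for x, y in eventos_lado_ordenado:
--         tiempos.append(x)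
--
--     for x, y in eventos_lado_ordenado:
--         lados.append(y)
--
--     for x, y in eventos_contexto_ordenado:
--         contextos.append(y)
--
--
--     return tiempos,lados,contextos
-- ===== SOURCE B (Python) =====
-- def _merge(a, b):
--     out = []
--     i = j = 0
--     while i < len(a) and j < len(b):
--         if a[i] <= b[j]:
--             out.append(a[i]); i += 1
--         else:
--             out.append(b[j]); j += 1
--     out.extend(a[i:])
--     out.extend(b[j:])
--     return out
--
-- def _mergesort(xs):
--     if len(xs) <= 1:
--         return xs
--     m = len(xs) // 2
--     return _merge(_mergesort(xs[:m]), _mergesort(xs[m:]))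
--
-- def ordenarTemporalmente(eventos_lado_recortado, eventos_contexto_recortado, eventos_tiempo_recortado):
--     pares_lado = _mergesort(list(zip(eventos_tiempo_recortado, eventos_lado_recortado)))
--     pares_contexto = _mergesort(list(zip(eventos_tiempo_recortado, eventos_contexto_recortado)))
--     tiempos = [p[0] for p in pares_lado]
--     lados = [p[1] for p in pares_lado]
--     contextos = [p[1] for p in pares_contexto]
--     return tiempos, lados, contextos
-- ===== Notes on version B (the rewrite author's own statement) =====
-- stated objective: alternative
-- what changed: B replaces the library sorts plus three unpacking append-loops by a hand-written top-down merge sort over the (time, value) pairs (correct because tuple comparison is a total order, so the sorted result is unique) and unzips the sorted pairs with comprehensions.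
import Mathlib
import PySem

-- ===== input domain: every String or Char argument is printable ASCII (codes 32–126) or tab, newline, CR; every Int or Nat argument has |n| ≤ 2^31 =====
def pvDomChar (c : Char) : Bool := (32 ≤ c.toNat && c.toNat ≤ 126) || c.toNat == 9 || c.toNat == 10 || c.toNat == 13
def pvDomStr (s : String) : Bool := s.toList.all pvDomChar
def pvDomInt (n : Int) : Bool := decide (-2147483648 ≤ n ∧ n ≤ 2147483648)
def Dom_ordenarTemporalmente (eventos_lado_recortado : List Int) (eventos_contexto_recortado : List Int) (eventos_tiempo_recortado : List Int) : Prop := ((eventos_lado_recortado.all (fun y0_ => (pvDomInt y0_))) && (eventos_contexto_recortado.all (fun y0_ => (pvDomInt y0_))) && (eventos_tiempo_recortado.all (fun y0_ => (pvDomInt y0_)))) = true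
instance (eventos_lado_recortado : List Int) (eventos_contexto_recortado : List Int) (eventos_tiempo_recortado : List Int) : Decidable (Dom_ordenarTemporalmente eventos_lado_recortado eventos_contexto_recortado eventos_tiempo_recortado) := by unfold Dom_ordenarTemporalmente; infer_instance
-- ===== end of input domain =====

-- B replaces A's two library sorts plus three append loops by an explicit top-down merge
-- sort over (time, value) pairs followed by unzipping comprehensions; an alternative
-- formulation of the same O(n log n) task, not claimed faster.


-- ===== PORT A =====
def ordenarTemporalmente (eventos_lado_recortado : List Int) (eventos_contexto_recortado : List Int) (eventos_tiempo_recortado : List Int) : List Int × List Int × List Int :=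
  let eventos_tiempo_recortado_2 := eventos_tiempo_recortado
  let eventos_lado_ordenado := PySem.List.sorted2 (eventos_tiempo_recortado.zip eventos_lado_recortado) Prod.fst Prod.snd
  let eventos_contexto_ordenado := PySem.List.sorted2 (eventos_tiempo_recortado_2.zip eventos_contexto_recortado) Prod.fst Prod.snd
  let tiempos := eventos_lado_ordenado.foldl (fun acc p => acc ++ [p.1]) []
  let lados := eventos_lado_ordenado.foldl (fun acc p => acc ++ [p.2]) []
  let contextos := eventos_contexto_ordenado.foldl (fun acc p => acc ++ [p.2]) []
  (tiempos, lados, contextos)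

-- ===== PORT B =====
-- Python's `a[i] <= b[j]` on int pairs is lexicographic tuple ≤; exact on Int × Int.
def pairLe (a b : Int × Int) : Bool :=
  decide (a.1 < b.1) || (decide (a.1 = b.1) && decide (a.2 ≤ b.2))

-- the two-pointer while loop of _merge, rendered as the standard structural recursion
-- on the unconsumed suffixes a[i:], b[j:] (same comparisons, same emission order)
def pvMerge : List (Int × Int) → List (Int × Int) → List (Int × Int)
  | [], b => b
  | x :: a, [] => x :: a
  | x :: a, y :: b => if pairLe x y then x :: pvMerge a (y :: b) else y :: pvMerge (x :: a) b

-- _mergesort; xs[:m] / xs[m:] with 0 ≤ m ≤ len(xs) are exactly take/drop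
def pvMergesort (xs : List (Int × Int)) : List (Int × Int) :=
  if xs.length ≤ 1 then xs
  else
    let m := xs.length / 2
    pvMerge (pvMergesort (xs.take m)) (pvMergesort (xs.drop m))
termination_by xs.length
decreasing_by
  · simp only [List.length_take]; omega
  · simp only [List.length_drop]; omega

def ordenarTemporalmente_alt (eventos_lado_recortado : List Int) (eventos_contexto_recortado : List Int) (eventos_tiempo_recortado : List Int) : List Int × List Int × List Int :=
  let pares_lado := pvMergesort (eventos_tiempo_recortado.zip eventos_lado_recortado)
  let pares_contexto := pvMergesort (eventos_tiempo_recortado.zip eventos_contexto_recortado)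
  let tiempos := pares_lado.map (fun p => p.1)
  let lados := pares_lado.map (fun p => p.2)
  let contextos := pares_contexto.map (fun p => p.2)
  (tiempos, lados, contextos)

-- ===== PRECONDITION & SPEC =====
def Spec_ordenarTemporalmente (eventos_lado_recortado : List Int) (eventos_contexto_recortado : List Int) (eventos_tiempo_recortado : List Int) (out : List Int × List Int × List Int) : Prop := out = ordenarTemporalmente_alt eventos_lado_recortado eventos_contexto_recortado eventos_tiempo_recortado
instance (eventos_lado_recortado : List Int) (eventos_contexto_recortado : List Int) (eventos_tiempo_recortado : List Int) (out : List Int × List Int × List Int) : Decidable (Spec_ordenarTemporalmente eventos_lado_recortado eventos_contexto_recortado eventos_tiempo_recortado out) := by unfold Spec_ordenarTemporalmente; infer_instance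

-- ===== CLAIM (what is proved, stated in full; the proofs are below) =====
def Claim_equal_ordenarTemporalmente : Prop := ∀ (eventos_lado_recortado : List Int) (eventos_contexto_recortado : List Int) (eventos_tiempo_recortado : List Int), Dom_ordenarTemporalmente eventos_lado_recortado eventos_contexto_recortado eventos_tiempo_recortado → Spec_ordenarTemporalmente eventos_lado_recortado eventos_contexto_recortado eventos_tiempo_recortado (ordenarTemporalmente eventos_lado_recortado eventos_contexto_recortado eventos_tiempo_recortado)

-- ===== LEMMAS AND PROOFS =====

-- the lexicographic order on Int × Int (a total, transitive, antisymmetric relation)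
def Rle (a b : Int × Int) : Prop := a.1 < b.1 ∨ (a.1 = b.1 ∧ a.2 ≤ b.2)

lemma Rle_total (a b : Int × Int) : Rle a b ∨ Rle b a := by unfold Rle; omega

lemma Rle_trans {a b c : Int × Int} (h1 : Rle a b) (h2 : Rle b c) : Rle a c := by
  unfold Rle at *; omega

lemma Rle_antisymm {a b : Int × Int} (h1 : Rle a b) (h2 : Rle b a) : a = b := by
  unfold Rle at *
  have : a.1 = b.1 ∧ a.2 = b.2 := by omega
  exact Prod.ext this.1 this.2

lemma pairLe_iff (a b : Int × Int) : pairLe a b = true ↔ Rle a b := by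
  simp [pairLe, Rle]

-- B side: merge correctness
lemma pvMerge_perm (a b : List (Int × Int)) : (pvMerge a b).Perm (a ++ b) := by
  fun_induction pvMerge a b with
  | case1 b => simp
  | case2 x a => simp
  | case3 x a y b h ih => simpa using ih.cons x
  | case4 x a y b h ih => exact (ih.cons y).trans List.perm_middle.symm

lemma mem_pvMerge {z : Int × Int} {a b : List (Int × Int)} :
    z ∈ pvMerge a b → z ∈ a ∨ z ∈ b := by
  intro h
  have := (pvMerge_perm a b).mem_iff.mp h
  simpa using this

lemma pvMerge_sorted {a b : List (Int × Int)}
    (ha : a.Pairwise Rle) (hb : b.Pairwise Rle) : (pvMerge a b).Pairwise Rle := by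
  fun_induction pvMerge a b with
  | case1 b => exact hb
  | case2 x a => exact ha
  | case3 x a y b h ih =>
      rw [List.pairwise_cons] at ha ⊢
      refine ⟨fun z hz => ?_, ih ha.2 hb⟩
      rcases mem_pvMerge hz with hz | hz
      · exact ha.1 z hz
      · have hxy : Rle x y := (pairLe_iff x y).mp h
        rw [List.pairwise_cons] at hb
        rcases List.mem_cons.mp hz with rfl | hz
        · exact hxy
        · exact Rle_trans hxy (hb.1 z hz)
  | case4 x a y b h ih =>
      rw [List.pairwise_cons] at hb ⊢
      refine ⟨fun z hz => ?_, ih ha hb.2⟩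
      have hyx : Rle y x := by
        rcases Rle_total x y with hxy | hyx
        · exact absurd ((pairLe_iff x y).mpr hxy) (by simpa using h)
        · exact hyx
      rcases mem_pvMerge hz with hz | hz
      · rw [List.pairwise_cons] at ha
        rcases List.mem_cons.mp hz with rfl | hz
        · exact hyx
        · exact Rle_trans hyx (ha.1 z hz)
      · exact hb.1 z hz

lemma pvMergesort_perm (xs : List (Int × Int)) : (pvMergesort xs).Perm xs := by
  fun_induction pvMergesort xs with
  | case1 xs h => rfl
  | case2 xs h m ih1 ih2 =>
      have h1 := (pvMerge_perm (pvMergesort (xs.take m)) (pvMergesort (xs.drop m))).trans (ih1.append ih2)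
      simpa [List.take_append_drop] using h1

lemma pvMergesort_sorted (xs : List (Int × Int)) : (pvMergesort xs).Pairwise Rle := by
  fun_induction pvMergesort xs with
  | case1 xs h =>
      match xs, h with
      | [], _ => simp
      | [x], _ => simp
  | case2 xs h m ih1 ih2 => exact pvMerge_sorted ih1 ih2

-- A side: PySem's insertion sort with the strict-lex comparator
def ltb (a b : Int × Int) : Bool :=
  decide (a.1 < b.1) || (!decide (b.1 < a.1) && decide (a.2 < b.2))

lemma ltb_iff (a b : Int × Int) : ltb a b = true ↔ ¬ Rle b a := by
  simp [ltb, Rle]; omega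

lemma insertBy_perm (x : Int × Int) (l : List (Int × Int)) :
    (PySem.List.insertBy ltb x l).Perm (x :: l) := by
  induction l with
  | nil => rfl
  | cons y ys ih =>
      simp only [PySem.List.insertBy]
      split
      · rfl
      · exact (ih.cons y).trans (List.Perm.swap x y ys)

lemma insertBy_sorted {l : List (Int × Int)} (x : Int × Int)
    (hl : l.Pairwise Rle) : (PySem.List.insertBy ltb x l).Pairwise Rle := by
  induction l with
  | nil => simp [PySem.List.insertBy]
  | cons y ys ih =>
      rw [List.pairwise_cons] at hl
      simp only [PySem.List.insertBy]
      split
      · rename_i h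
        have hxy : Rle x y := by
          rcases Rle_total x y with h' | h'
          · exact h'
          · exact absurd h' ((ltb_iff x y).mp h)
        rw [List.pairwise_cons]
        refine ⟨fun z hz => ?_, List.pairwise_cons.mpr hl⟩
        rcases List.mem_cons.mp hz with rfl | hz
        · exact hxy
        · exact Rle_trans hxy (hl.1 z hz)
      · rename_i h
        have hyx : Rle y x := by
          by_contra hc
          exact h ((ltb_iff x y).mpr hc)
        rw [List.pairwise_cons]
        refine ⟨fun z hz => ?_, ih hl.2⟩
        rcases (insertBy_perm x ys).mem_iff.mp hz with hz'
        rcases List.mem_cons.mp hz' with rfl | hz'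
        · exact hyx
        · exact hl.1 z hz'

lemma foldl_insertBy_spec (xs acc : List (Int × Int)) (hacc : acc.Pairwise Rle) :
    (xs.foldl (fun acc x => PySem.List.insertBy ltb x acc) acc).Pairwise Rle ∧
    (xs.foldl (fun acc x => PySem.List.insertBy ltb x acc) acc).Perm (acc ++ xs) := by
  induction xs generalizing acc with
  | nil => exact ⟨hacc, by simp⟩
  | cons x xs ih =>
      obtain ⟨hs, hp⟩ := ih (PySem.List.insertBy ltb x acc) (insertBy_sorted x hacc)
      exact ⟨hs, hp.trans (((insertBy_perm x acc).append_right xs).trans List.perm_middle.symm)⟩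

-- the two sorts agree: both are Rle-sorted rearrangements of the same pairs
lemma sorted2_eq_pvMergesort (xs : List (Int × Int)) :
    PySem.List.sorted2 xs Prod.fst Prod.snd = pvMergesort xs := by
  have hdef : PySem.List.sorted2 xs Prod.fst Prod.snd
      = xs.foldl (fun acc x => PySem.List.insertBy ltb x acc) [] := rfl
  obtain ⟨hs, hp⟩ := foldl_insertBy_spec xs [] (by simp)
  rw [hdef]
  have hp' : (xs.foldl (fun acc x => PySem.List.insertBy ltb x acc) []).Perm xs := by
    simpa using hp
  exact List.Perm.eq_of_pairwise (fun a b _ _ h1 h2 => Rle_antisymm h1 h2)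
    hs (pvMergesort_sorted xs) (hp'.trans (pvMergesort_perm xs).symm)

-- ===== VERDICT (by name: the statement is the Claim_ definition above) =====
theorem ordenarTemporalmente_spec : Claim_equal_ordenarTemporalmente := by
  intro l c t _
  show _ = _
  unfold ordenarTemporalmente ordenarTemporalmente_alt
  simp only [PySem.List.foldl_append_singleton_eq_map, List.nil_append,
    sorted2_eq_pvMergesort]
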